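-- pv_equiv track=rewrite | github.com/RikVN/DSI | src/basic_classifiers.py | down_sample_data
-- ===== SOURCE A (Python) =====
-- def down_sample_other(X_train, Y_train):
--     '''Downsample the "other" label to be the same size as the full DSI data set without other'''
--     X_final, Y_final = [], []
--     # This is the amount of non-other instances
--     num_dsi = len([x for x in Y_train if x != "other"])
--     cur_other = 0
--     # Keep all instances, except perhaps filter some of the "other" category
--     for inst, label in zip(X_train, Y_train):
--         if label == "other":
--             cur_other += 1
--             if cur_other > num_dsi:
--                 continue
--         X_final.append(inst)
--         Y_final.append(label)
--     return X_final, Y_final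
--
-- def down_sample_data(X_orig, Y_orig, max_inst, also_other):
--     '''Downsample categories to the max amount of instances'''
--     X_train, Y_train = [], []
--     cat_count = {cat: 0 for cat in set(Y_orig)}
--     for inst, label in zip(X_orig, Y_orig):
--         # If category occured enough, stop adding
--         # We do not downsample "other", unless we specified also other
--         if cat_count[label] < max_inst or (label == "other" and not also_other):
--             X_train.append(inst)
--             Y_train.append(label)
--             cat_count[label] += 1
--     # Check if we have to do something with the "other" category
--     if also_other:
--         return X_train, Y_train
--     # By default, we now downsample the "other" label to be the same size as the full data set
--     return down_sample_other(X_train, Y_train)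
-- ===== SOURCE B (Python) =====
-- def down_sample_cap_table(pairs, max_inst, also_other):
--     '''Per-category keep-caps: min(total, max_inst) for each category, and, when "other" is
--     not downsampled by max_inst, a closed cap for "other" equal to the summed non-other caps.'''
--     totals = {}
--     for _, lab in pairs:
--         totals[lab] = totals.get(lab, 0) + 1
--     hi = max_inst if max_inst > 0 else 0
--     cap = {lab: (t if t < hi else hi) for lab, t in totals.items()}
--     if not also_other and "other" in cap:
--         cap["other"] = sum(c for lab, c in cap.items() if lab != "other")
--     return cap
--
-- def down_sample_data(X_orig, Y_orig, max_inst, also_other):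
--     '''Downsample categories to the max amount of instances (cap-table re-implementation)'''
--     pairs = list(zip(X_orig, Y_orig))
--     cap = down_sample_cap_table(pairs, max_inst, also_other)
--     X_new, Y_new = [], []
--     seen = {}
--     for inst, lab in pairs:
--         c = seen.get(lab, 0)
--         if c < cap[lab]:
--             X_new.append(inst)
--             Y_new.append(lab)
--             seen[lab] = c + 1
--     return X_new, Y_new
-- ===== Notes on version B (the rewrite author's own statement) =====
-- stated objective: alternative
-- what changed: A interleaves counting with output (capped first pass over the data, then a second full pass that re-counts and truncates 'other'); B instead precomputes a complete per-category total table, derives closed-form keep-caps from it (with the 'other' cap equal to the summed non-other caps when also_other is false), and produces the result in one filtering pass with a running counter, with no second truncation pass.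
import Mathlib
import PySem

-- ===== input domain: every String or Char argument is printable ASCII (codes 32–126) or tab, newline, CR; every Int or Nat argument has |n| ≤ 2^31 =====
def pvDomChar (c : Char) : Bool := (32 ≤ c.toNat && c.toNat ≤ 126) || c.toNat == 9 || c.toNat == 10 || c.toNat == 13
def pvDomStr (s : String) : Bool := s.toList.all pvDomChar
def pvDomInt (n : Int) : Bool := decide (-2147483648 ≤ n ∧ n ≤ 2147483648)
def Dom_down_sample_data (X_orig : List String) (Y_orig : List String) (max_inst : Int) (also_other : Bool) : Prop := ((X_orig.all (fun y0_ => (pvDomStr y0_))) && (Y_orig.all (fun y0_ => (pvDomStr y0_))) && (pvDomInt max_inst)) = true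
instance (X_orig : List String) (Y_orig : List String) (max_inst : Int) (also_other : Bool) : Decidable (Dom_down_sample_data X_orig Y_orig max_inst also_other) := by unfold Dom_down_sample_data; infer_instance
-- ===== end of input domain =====

-- B re-implements A with a precomputed per-category cap table and one filtering pass
-- (alternative decomposition, same exact return value; no speed claim).

-- ===== PORT A =====
-- helper of A: down_sample_other, ported literally (num_dsi, then one loop with a running
-- cur_other counter; list appends kept as appends).
def down_sample_other (X_train : List String) (Y_train : List String) : List String × List String :=
  let num_dsi : Int := ((Y_train.filter (fun x => ¬ (x = "other"))).length : Int)
  let st := (X_train.zip Y_train).foldl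
    (fun (s : List String × List String × Int) p =>
      if p.2 = "other" then
        (if s.2.2 + 1 > num_dsi then (s.1, s.2.1, s.2.2 + 1)
         else (s.1 ++ [p.1], s.2.1 ++ [p.2], s.2.2 + 1))
      else (s.1 ++ [p.1], s.2.1 ++ [p.2], s.2.2))
    ([], [], (0 : Int))
  (st.1, st.2.1)

-- A: dict cat_count over set(Y_orig), one capped pass, then optionally down_sample_other.
-- cat_count[label] / cat_count[label] += 1: the key is always present (labels come from
-- zip(X_orig, Y_orig) and the dict is keyed by set(Y_orig)), so KeyError is unreachable;
-- ported with getD/insert (default 0 only on that unreachable path).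
def down_sample_data (X_orig : List String) (Y_orig : List String) (max_inst : Int) (also_other : Bool) : List String × List String :=
  let cat_count : PySem.Dict String Int :=
    (PySem.Set.ofList Y_orig).foldl (fun d cat => d.insert cat 0) PySem.Dict.empty
  let st := (X_orig.zip Y_orig).foldl
    (fun (s : List String × List String × PySem.Dict String Int) p =>
      if s.2.2.getD p.2 0 < max_inst ∨ (p.2 = "other" ∧ also_other = false) then
        (s.1 ++ [p.1], s.2.1 ++ [p.2], s.2.2.insert p.2 (s.2.2.getD p.2 0 + 1))
      else s)
    ([], [], cat_count)
  if also_other then (st.1, st.2.1)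
  else down_sample_other st.1 st.2.1

-- ===== PORT B =====
-- helper of B: the per-category cap table (dict comprehension ported as a fold of inserts
-- over totals.items).
def down_sample_cap_table (pairs : List (String × String)) (max_inst : Int) (also_other : Bool) : PySem.Dict String Int :=
  let totals : PySem.Dict String Int :=
    pairs.foldl (fun d p => d.insert p.2 (d.getD p.2 0 + 1)) PySem.Dict.empty
  let hi : Int := if max_inst > 0 then max_inst else 0
  let cap : PySem.Dict String Int :=
    totals.items.foldl (fun d q => d.insert q.1 (if q.2 < hi then q.2 else hi)) PySem.Dict.empty
  if also_other = false ∧ cap.contains "other" then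
    cap.insert "other" (((cap.items.filter (fun q => ¬ (q.1 = "other"))).map (·.2)).sum)
  else cap

-- B: build the cap table, then a single filtering pass with a seen-counter dict.
-- cap[lab] in the loop: lab is a key of cap by construction, so KeyError is unreachable;
-- ported with getD (default 0 only on that unreachable path).
def down_sample_data_alt (X_orig : List String) (Y_orig : List String) (max_inst : Int) (also_other : Bool) : List String × List String :=
  let pairs := X_orig.zip Y_orig
  let cap := down_sample_cap_table pairs max_inst also_other
  let st := pairs.foldl
    (fun (s : List String × List String × PySem.Dict String Int) p =>
      if s.2.2.getD p.2 0 < cap.getD p.2 0 then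
        (s.1 ++ [p.1], s.2.1 ++ [p.2], s.2.2.insert p.2 (s.2.2.getD p.2 0 + 1))
      else s)
    ([], [], PySem.Dict.empty)
  (st.1, st.2.1)

-- ===== PRECONDITION & SPEC =====
def Spec_down_sample_data (X_orig : List String) (Y_orig : List String) (max_inst : Int) (also_other : Bool) (out : List String × List String) : Prop := out = down_sample_data_alt X_orig Y_orig max_inst also_other
instance (X_orig : List String) (Y_orig : List String) (max_inst : Int) (also_other : Bool) (out : List String × List String) : Decidable (Spec_down_sample_data X_orig Y_orig max_inst also_other out) := by unfold Spec_down_sample_data; infer_instance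

-- ===== CLAIM (what is proved, stated in full; the proofs are below) =====
def Claim_equal_down_sample_data : Prop := ∀ (X_orig : List String) (Y_orig : List String) (max_inst : Int) (also_other : Bool), Dom_down_sample_data X_orig Y_orig max_inst also_other → Spec_down_sample_data X_orig Y_orig max_inst also_other (down_sample_data X_orig Y_orig max_inst also_other)

-- ===== LEMMAS AND PROOFS =====

/-- bump a per-label occurrence counter -/
def pvBump (occ : String → Int) (lab : String) : String → Int :=
  fun x => if x = lab then occ x + 1 else occ x

/-- the common spec of all three loops: keep a pair iff `keep label o` where `o` is the
number of earlier same-label pairs (counted from `occ`). -/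
def pvCFilter (keep : String → Int → Bool) : List (String × String) → (String → Int) → List (String × String)
  | [], _ => []
  | p :: rest, occ =>
    if keep p.2 (occ p.2) then p :: pvCFilter keep rest (pvBump occ p.2)
    else pvCFilter keep rest (pvBump occ p.2)

/-- canonical predicate of A's first loop -/
def pvKA (max_inst : Int) (also_other : Bool) (lab : String) (o : Int) : Bool :=
  decide (o < max_inst ∨ (lab = "other" ∧ also_other = false))

/-- canonical predicate of A's second loop (down_sample_other) -/
def pvK2 (num_dsi : Int) (lab : String) (o : Int) : Bool :=
  decide (¬ lab = "other" ∨ o < num_dsi)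

/-- canonical predicate of B's filtering loop -/
def pvKB (capf : String → Int) (lab : String) (o : Int) : Bool :=
  decide (o < capf lab)

/-- A's kept-count as a function of the occurrence count -/
def pvGA (max_inst : Int) (also_other : Bool) (lab : String) (o : Int) : Int :=
  if lab = "other" ∧ also_other = false then o else min o (max max_inst 0)

theorem pvCFilter_sublist (keep : String → Int → Bool) :
    ∀ (l : List (String × String)) (occ : String → Int), (pvCFilter keep l occ).Sublist l := by
  intro l
  induction l with
  | nil => intro occ; simp [pvCFilter]
  | cons p rest ih =>
    intro occ
    simp only [pvCFilter]
    split
    · exact (ih _).cons₂ p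
    · exact (ih _).cons p

theorem pvCFilter_congr (k1 k2 : String → Int → Bool) :
    ∀ (l : List (String × String)) (occ : String → Int),
      (∀ lab c, occ lab ≤ c → c < occ lab + ((l.map (·.2)).count lab : Int) → k1 lab c = k2 lab c) →
      pvCFilter k1 l occ = pvCFilter k2 l occ := by
  intro l
  induction l with
  | nil => intro occ h; rfl
  | cons p rest ih =>
    intro occ h
    have hcnt : ∀ lab, (((p :: rest).map (·.2)).count lab : Int)
        = ((rest.map (·.2)).count lab : Int) + (if lab = p.2 then 1 else 0) := by
      intro lab
      rw [List.map_cons, List.count_cons]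
      by_cases hl : lab = p.2
      · subst hl; simp
      · push_cast [beq_iff_eq, Ne.symm hl]; simp [hl]
    have hhead : k1 p.2 (occ p.2) = k2 p.2 (occ p.2) := by
      apply h p.2 (occ p.2) le_rfl
      have := hcnt p.2
      rw [if_pos rfl] at this
      have h0 : (0:Int) ≤ ((rest.map (·.2)).count p.2 : Int) := by positivity
      omega
    have htail : ∀ lab c, (pvBump occ p.2) lab ≤ c →
        c < (pvBump occ p.2) lab + ((rest.map (·.2)).count lab : Int) → k1 lab c = k2 lab c := by
      intro lab c hlo hhi
      have hb : pvBump occ p.2 lab = if lab = p.2 then occ lab + 1 else occ lab := rfl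
      rw [hb] at hlo hhi
      have := hcnt lab
      apply h lab c <;> split_ifs at hlo hhi this <;> omega
    simp only [pvCFilter, hhead, ih _ htail]

theorem pvCFilter_comp (k1 k2 : String → Int → Bool)
    (h1 : ∀ c, k1 "other" c = true)
    (h2 : ∀ lab c, lab ≠ "other" → k2 lab c = true) :
    ∀ (l : List (String × String)) (occ occ2 : String → Int), occ2 "other" = occ "other" →
      pvCFilter k2 (pvCFilter k1 l occ) occ2 = pvCFilter (fun lab c => k1 lab c && k2 lab c) l occ := by
  intro l
  induction l with
  | nil => intro occ occ2 _; rfl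
  | cons p rest ih =>
    intro occ occ2 hoth
    by_cases hp : p.2 = "other"
    · have hk1 : k1 p.2 (occ p.2) = true := by rw [hp]; exact h1 _
      have hocc2 : occ2 p.2 = occ p.2 := by rw [hp]; exact hoth
      have hbump : (pvBump occ2 p.2) "other" = (pvBump occ p.2) "other" := by
        simp [pvBump, hp, hoth]
      simp only [pvCFilter, hk1, Bool.true_and, if_true, hocc2]
      by_cases hk2 : k2 p.2 (occ p.2) = true
      · simp only [hk2, if_true, ih _ _ hbump]
      · rw [if_neg hk2, if_neg hk2, ih _ _ hbump]
    · have hno : ¬ ("other" = p.2) := fun h => hp h.symm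
      have hk2 : ∀ c, k2 p.2 c = true := fun c => h2 _ _ hp
      by_cases hk1 : k1 p.2 (occ p.2) = true
      · have hbump : (pvBump occ2 p.2) "other" = (pvBump occ p.2) "other" := by
          simp [pvBump, hno, hoth]
        simp only [pvCFilter, hk1, hk2, Bool.true_and, if_true, ih _ _ hbump]
      · have hk1' : k1 p.2 (occ p.2) = false := by simp at hk1; exact hk1
        have hbump : occ2 "other" = (pvBump occ p.2) "other" := by
          simp [pvBump, hno, hoth]
        simp only [pvCFilter, hk1', Bool.false_eq_true, if_false, Bool.false_and,
          ih _ _ hbump]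

theorem pvCFilter_count (keep : String → Int → Bool) (lab : String) (cap : Int)
    (hlab : ∀ c, keep lab c = decide (c < cap)) :
    ∀ (l : List (String × String)) (occ : String → Int),
      (((pvCFilter keep l occ).map (·.2)).count lab : Int)
        = max 0 (min (cap - occ lab) ((l.map (·.2)).count lab : Int)) := by
  intro l
  induction l with
  | nil => intro occ; simp [pvCFilter]
  | cons p rest ih =>
    intro occ
    by_cases hp : p.2 = lab
    · subst hp
      have hb : pvBump occ p.2 p.2 = occ p.2 + 1 := by simp [pvBump]
      rw [List.map_cons, List.count_cons_self]
      by_cases hk : occ p.2 < cap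
      · have hkt : keep p.2 (occ p.2) = true := by rw [hlab]; simp [hk]
        simp only [pvCFilter, hkt, if_true, List.map_cons, List.count_cons_self]
        push_cast
        rw [ih, hb]
        omega
      · have hkf : keep p.2 (occ p.2) = false := by rw [hlab]; simp; omega
        simp only [pvCFilter, hkf, Bool.false_eq_true, if_false]
        push_cast
        rw [ih, hb]
        omega
    · have hne : ¬ lab = p.2 := fun h => hp h.symm
      have hb : pvBump occ p.2 lab = occ lab := by simp [pvBump, hne]
      simp only [pvCFilter]
      split
      · simp only [List.map_cons, List.count_cons, beq_iff_eq, if_neg hp, Nat.add_zero]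
        rw [ih, hb]
      · rw [ih, hb]
        simp [hp]

theorem pvFoldA (max_inst : Int) (also_other : Bool) :
    ∀ (l : List (String × String)) (occ : String → Int) (X Y : List String) (d : PySem.Dict String Int),
      (∀ lab, 0 ≤ occ lab) →
      (∀ lab, d.getD lab 0 = pvGA max_inst also_other lab (occ lab)) →
      ∃ d', l.foldl
          (fun (s : List String × List String × PySem.Dict String Int) p =>
            if s.2.2.getD p.2 0 < max_inst ∨ (p.2 = "other" ∧ also_other = false) then
              (s.1 ++ [p.1], s.2.1 ++ [p.2], s.2.2.insert p.2 (s.2.2.getD p.2 0 + 1))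
            else s) (X, Y, d)
        = (X ++ (pvCFilter (pvKA max_inst also_other) l occ).map (·.1),
           Y ++ (pvCFilter (pvKA max_inst also_other) l occ).map (·.2), d') := by
  intro l
  induction l with
  | nil => exact fun occ X Y d _ _ => ⟨d, by simp [pvCFilter]⟩
  | cons p rest ih =>
    intro occ X Y d hocc hinv
    have hcond : (d.getD p.2 0 < max_inst ∨ (p.2 = "other" ∧ also_other = false))
        ↔ (occ p.2 < max_inst ∨ (p.2 = "other" ∧ also_other = false)) := by
      rw [hinv p.2]
      unfold pvGA
      have := hocc p.2
      by_cases hs : p.2 = "other" ∧ also_other = false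
      · simp [hs]
      · simp only [if_neg hs]
        constructor
        · rintro (h | h)
          · left; omega
          · exact absurd h hs
        · rintro (h | h)
          · left; omega
          · exact absurd h hs
    have hocc' : ∀ lab, 0 ≤ pvBump occ p.2 lab := by
      intro lab; unfold pvBump; have := hocc lab; split <;> omega
    by_cases hkp : occ p.2 < max_inst ∨ (p.2 = "other" ∧ also_other = false)
    · have hk : pvKA max_inst also_other p.2 (occ p.2) = true := by
        unfold pvKA; exact decide_eq_true hkp
      have hc : d.getD p.2 0 < max_inst ∨ (p.2 = "other" ∧ also_other = false) :=
        hcond.mpr hkp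
      have hinv' : ∀ lab, (d.insert p.2 (d.getD p.2 0 + 1)).getD lab 0
          = pvGA max_inst also_other lab (pvBump occ p.2 lab) := by
        intro lab
        rw [PySem.Dict.getD_insert]
        unfold pvBump
        by_cases he : lab = p.2
        · rw [if_pos he, if_pos he, hinv p.2, he]
          unfold pvGA
          by_cases hs : p.2 = "other" ∧ also_other = false
          · simp [hs]
          · simp only [if_neg hs]
            have := hocc p.2
            rcases hkp with hlt | hcs
            · omega
            · exact absurd hcs hs
        · rw [if_neg he, if_neg he]
          exact hinv lab
      obtain ⟨d', hd'⟩ := ih (pvBump occ p.2) (X ++ [p.1]) (Y ++ [p.2])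
        (d.insert p.2 (d.getD p.2 0 + 1)) hocc' hinv'
      refine ⟨d', ?_⟩
      simp only [List.foldl_cons]
      rw [if_pos hc, hd']
      simp [pvCFilter, hk, List.append_assoc]
    · have hk : pvKA max_inst also_other p.2 (occ p.2) = false := by
        unfold pvKA; exact decide_eq_false hkp
      have hc : ¬ (d.getD p.2 0 < max_inst ∨ (p.2 = "other" ∧ also_other = false)) :=
        fun h => hkp (hcond.mp h)
      have hinv' : ∀ lab, d.getD lab 0 = pvGA max_inst also_other lab (pvBump occ p.2 lab) := by
        intro lab
        unfold pvBump
        by_cases he : lab = p.2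
        · rw [if_pos he, hinv lab, he]
          unfold pvGA
          by_cases hs : p.2 = "other" ∧ also_other = false
          · exact absurd (Or.inr hs) hkp
          · simp only [if_neg hs]
            have h1 := hocc p.2
            have h2 : ¬ (occ p.2 < max_inst) := fun hlt => hkp (Or.inl hlt)
            omega
        · rw [if_neg he]
          exact hinv lab
      obtain ⟨d', hd'⟩ := ih (pvBump occ p.2) X Y d hocc' hinv'
      refine ⟨d', ?_⟩
      simp only [List.foldl_cons]
      rw [if_neg hc, hd']
      simp [pvCFilter, hk]

theorem pvFoldB (capf : String → Int) (cap : PySem.Dict String Int)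
    (hcap : ∀ lab, cap.getD lab 0 = capf lab) :
    ∀ (l : List (String × String)) (occ : String → Int) (X Y : List String) (d : PySem.Dict String Int),
      (∀ lab, 0 ≤ occ lab) →
      (∀ lab, d.getD lab 0 = min (occ lab) (max (capf lab) 0)) →
      ∃ d', l.foldl
          (fun (s : List String × List String × PySem.Dict String Int) p =>
            if s.2.2.getD p.2 0 < cap.getD p.2 0 then
              (s.1 ++ [p.1], s.2.1 ++ [p.2], s.2.2.insert p.2 (s.2.2.getD p.2 0 + 1))
            else s) (X, Y, d)
        = (X ++ (pvCFilter (pvKB capf) l occ).map (·.1),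
           Y ++ (pvCFilter (pvKB capf) l occ).map (·.2), d') := by
  intro l
  induction l with
  | nil => exact fun occ X Y d _ _ => ⟨d, by simp [pvCFilter]⟩
  | cons p rest ih =>
    intro occ X Y d hocc hinv
    have hcond : (d.getD p.2 0 < cap.getD p.2 0) ↔ (occ p.2 < capf p.2) := by
      rw [hinv p.2, hcap p.2]
      have := hocc p.2
      omega
    have hocc' : ∀ lab, 0 ≤ pvBump occ p.2 lab := by
      intro lab; unfold pvBump; have := hocc lab; split <;> omega
    by_cases hkp : occ p.2 < capf p.2
    · have hk : pvKB capf p.2 (occ p.2) = true := by unfold pvKB; exact decide_eq_true hkp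
      have hinv' : ∀ lab, (d.insert p.2 (d.getD p.2 0 + 1)).getD lab 0
          = min (pvBump occ p.2 lab) (max (capf lab) 0) := by
        intro lab
        rw [PySem.Dict.getD_insert]
        unfold pvBump
        by_cases he : lab = p.2
        · rw [if_pos he, if_pos he, hinv p.2, he]
          have := hocc p.2
          omega
        · rw [if_neg he, if_neg he]
          exact hinv lab
      obtain ⟨d', hd'⟩ := ih (pvBump occ p.2) (X ++ [p.1]) (Y ++ [p.2])
        (d.insert p.2 (d.getD p.2 0 + 1)) hocc' hinv'
      refine ⟨d', ?_⟩
      simp only [List.foldl_cons]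
      rw [if_pos (hcond.mpr hkp), hd']
      simp [pvCFilter, hk, List.append_assoc]
    · have hk : pvKB capf p.2 (occ p.2) = false := by unfold pvKB; exact decide_eq_false hkp
      have hinv' : ∀ lab, d.getD lab 0 = min (pvBump occ p.2 lab) (max (capf lab) 0) := by
        intro lab
        unfold pvBump
        by_cases he : lab = p.2
        · rw [if_pos he, hinv lab, he]
          have := hocc p.2
          omega
        · rw [if_neg he]
          exact hinv lab
      obtain ⟨d', hd'⟩ := ih (pvBump occ p.2) X Y d hocc' hinv'
      refine ⟨d', ?_⟩
      simp only [List.foldl_cons]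
      rw [if_neg (fun h => hkp (hcond.mp h)), hd']
      simp [pvCFilter, hk]

theorem pvFoldO (num_dsi : Int) :
    ∀ (l : List (String × String)) (occ : String → Int) (X Y : List String) (cur : Int),
      cur = occ "other" →
      ∃ c', l.foldl
          (fun (s : List String × List String × Int) p =>
            if p.2 = "other" then
              (if s.2.2 + 1 > num_dsi then (s.1, s.2.1, s.2.2 + 1)
               else (s.1 ++ [p.1], s.2.1 ++ [p.2], s.2.2 + 1))
            else (s.1 ++ [p.1], s.2.1 ++ [p.2], s.2.2)) (X, Y, cur)
        = (X ++ (pvCFilter (pvK2 num_dsi) l occ).map (·.1),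
           Y ++ (pvCFilter (pvK2 num_dsi) l occ).map (·.2), c') := by
  intro l
  induction l with
  | nil => exact fun occ X Y cur _ => ⟨cur, by simp [pvCFilter]⟩
  | cons p rest ih =>
    intro occ X Y cur hcur
    by_cases hp : p.2 = "other"
    · have hb : (pvBump occ p.2) "other" = cur + 1 := by
        unfold pvBump; rw [if_pos hp.symm, hcur]
      by_cases hgt : cur + 1 > num_dsi
      · have hk : pvK2 num_dsi p.2 (occ p.2) = false := by
          unfold pvK2
          apply decide_eq_false
          rw [hp, ← hcur]
          intro h
          rcases h with h | h
          · exact h rfl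
          · omega
        obtain ⟨c', hc'⟩ := ih (pvBump occ p.2) X Y (cur + 1) hb.symm
        refine ⟨c', ?_⟩
        simp only [List.foldl_cons]
        rw [if_pos hp, if_pos hgt, hc']
        simp [pvCFilter, hk]
      · have hk : pvK2 num_dsi p.2 (occ p.2) = true := by
          unfold pvK2
          apply decide_eq_true
          right
          rw [hp, ← hcur]
          omega
        obtain ⟨c', hc'⟩ := ih (pvBump occ p.2) (X ++ [p.1]) (Y ++ [p.2]) (cur + 1) hb.symm
        refine ⟨c', ?_⟩
        simp only [List.foldl_cons]
        rw [if_pos hp, if_neg hgt, hc']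
        simp [pvCFilter, hk, List.append_assoc]
    · have hb : (pvBump occ p.2) "other" = cur := by
        unfold pvBump; rw [if_neg (fun h => hp h.symm), hcur]
      have hk : pvK2 num_dsi p.2 (occ p.2) = true := by
        unfold pvK2; exact decide_eq_true (Or.inl hp)
      obtain ⟨c', hc'⟩ := ih (pvBump occ p.2) (X ++ [p.1]) (Y ++ [p.2]) cur hb.symm
      refine ⟨c', ?_⟩
      simp only [List.foldl_cons]
      rw [if_neg hp, hc']
      simp [pvCFilter, hk, List.append_assoc]

/-- A's initial dict (all values 0) looks like the zero counter through getD. -/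
theorem pvInitA (S : List String) :
    ∀ (d : PySem.Dict String Int), (∀ lab, d.getD lab 0 = 0) →
      ∀ lab, (S.foldl (fun d cat => d.insert cat 0) d).getD lab 0 = 0 := by
  intro d hd
  induction S generalizing d with
  | nil => exact hd
  | cons c S ih =>
    intro lab
    simp only [List.foldl_cons]
    exact ih _ (fun lab => by rw [PySem.Dict.getD_insert]; split <;> simp [hd]) lab


theorem pvGA_zero (max_inst : Int) (also_other : Bool) (lab : String) :
    pvGA max_inst also_other lab 0 = 0 := by
  unfold pvGA; split
  · rfl
  · omega

theorem pvAShape (X_orig Y_orig : List String) (max_inst : Int) (also_other : Bool) :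
    down_sample_data X_orig Y_orig max_inst also_other
      = (if also_other then
          ((pvCFilter (pvKA max_inst also_other) (X_orig.zip Y_orig) (fun _ => 0)).map (·.1),
           (pvCFilter (pvKA max_inst also_other) (X_orig.zip Y_orig) (fun _ => 0)).map (·.2))
         else down_sample_other
          ((pvCFilter (pvKA max_inst also_other) (X_orig.zip Y_orig) (fun _ => 0)).map (·.1))
          ((pvCFilter (pvKA max_inst also_other) (X_orig.zip Y_orig) (fun _ => 0)).map (·.2))) := by
  obtain ⟨d', hd'⟩ := pvFoldA max_inst also_other (X_orig.zip Y_orig) (fun _ => 0) [] []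
    ((PySem.Set.ofList Y_orig).foldl (fun d cat => d.insert cat 0) PySem.Dict.empty)
    (fun _ => le_rfl)
    (fun lab => by
      rw [pvGA_zero]
      exact pvInitA (PySem.Set.ofList Y_orig) PySem.Dict.empty (fun lab => by simp) lab)
  unfold down_sample_data
  simp only [hd', List.nil_append]

theorem pvOtherShape (k : List (String × String)) :
    down_sample_other (k.map (·.1)) (k.map (·.2))
      = ((pvCFilter (pvK2 (((k.map (·.2)).filter (fun x => ¬ (x = "other"))).length : Int)) k (fun _ => 0)).map (·.1),
         (pvCFilter (pvK2 (((k.map (·.2)).filter (fun x => ¬ (x = "other"))).length : Int)) k (fun _ => 0)).map (·.2)) := by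
  obtain ⟨c', hc'⟩ := pvFoldO (((k.map (·.2)).filter (fun x => ¬ (x = "other"))).length : Int)
    k (fun _ => 0) [] [] 0 rfl
  unfold down_sample_other
  have hzip : (k.map (·.1)).zip (k.map (·.2)) = k := by
    rw [List.zip_map']
    simp
  unfold down_sample_other at *
  simp only [hzip, hc', List.nil_append]

theorem pvBShape (X_orig Y_orig : List String) (max_inst : Int) (also_other : Bool) :
    down_sample_data_alt X_orig Y_orig max_inst also_other
      = ((pvCFilter (pvKB (fun lab => (down_sample_cap_table (X_orig.zip Y_orig) max_inst also_other).getD lab 0))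
            (X_orig.zip Y_orig) (fun _ => 0)).map (·.1),
         (pvCFilter (pvKB (fun lab => (down_sample_cap_table (X_orig.zip Y_orig) max_inst also_other).getD lab 0))
            (X_orig.zip Y_orig) (fun _ => 0)).map (·.2)) := by
  obtain ⟨d', hd'⟩ := pvFoldB
      (fun lab => (down_sample_cap_table (X_orig.zip Y_orig) max_inst also_other).getD lab 0)
      (down_sample_cap_table (X_orig.zip Y_orig) max_inst also_other) (fun _ => rfl)
      (X_orig.zip Y_orig) (fun _ => 0) [] [] PySem.Dict.empty (fun _ => le_rfl)
      (fun lab => by simp)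
  unfold down_sample_data_alt
  simp only [hd', List.nil_append]

/-- value of the cap table at a label present in the data (before the "other" overwrite) -/
def pvCapv (labels : List String) (max_inst : Int) (k : String) : Int :=
  if ((labels.count k : Int)) < (if max_inst > 0 then max_inst else 0)
  then ((labels.count k : Int)) else (if max_inst > 0 then max_inst else 0)

/-- the summed non-other caps (B's closed-form cap for "other") -/
def pvSigma (labels : List String) (max_inst : Int) : Int :=
  (((PySem.Set.ofList labels).filter (fun k => ¬ (k = "other"))).map (pvCapv labels max_inst)).sum

theorem pvCap0_items (pairs : List (String × String)) (max_inst : Int) :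
    ((pairs.foldl (fun d p => d.insert p.2 (d.getD p.2 0 + 1)) PySem.Dict.empty).items.foldl
        (fun d q => d.insert q.1 (if q.2 < (if max_inst > 0 then max_inst else 0) then q.2
                                  else (if max_inst > 0 then max_inst else 0))) PySem.Dict.empty).items
      = (PySem.Set.ofList (pairs.map (·.2))).map
          (fun k => (k, pvCapv (pairs.map (·.2)) max_inst k)) := by
  have htot : pairs.foldl (fun d p => d.insert p.2 (d.getD p.2 0 + 1)) PySem.Dict.empty
      = PySem.Dict.counter (pairs.map (·.2)) := by
    rw [← PySem.Dict.foldl_insert_getD_add_one_eq_counter, List.foldl_map]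
  rw [htot]
  rw [PySem.Dict.items_foldl_insert_fresh _ _ _ _ (fun a _ => by simp)
    (by
      have : (PySem.Dict.counter (pairs.map (·.2))).items.map (·.1)
          = (PySem.Dict.counter (pairs.map (·.2))).keys := rfl
      rw [this]
      exact PySem.Dict.nodup_keys_counter _)]
  rw [PySem.Dict.items_counter, List.map_map]
  simp [pvCapv, Function.comp_def, PySem.Dict.empty]

theorem pvCapF_getD (labels : List String) (max_inst : Int) (also_other : Bool)
    (cap0 capF : PySem.Dict String Int)
    (hitems : cap0.items = (PySem.Set.ofList labels).map (fun k => (k, pvCapv labels max_inst k)))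
    (hcapF : capF = if also_other = false ∧ cap0.contains "other" then
        cap0.insert "other" (((cap0.items.filter (fun q => ¬ (q.1 = "other"))).map (·.2)).sum)
      else cap0) :
    (∀ lab, lab ∈ labels → ¬ (lab = "other" ∧ also_other = false) →
        capF.getD lab 0 = pvCapv labels max_inst lab)
  ∧ (also_other = false → "other" ∈ labels →
        capF.getD "other" 0 = pvSigma labels max_inst) := by
  have hkeys : cap0.keys = PySem.Set.ofList labels := by
    have h1 : cap0.keys = cap0.items.map (·.1) := rfl
    rw [h1, hitems, List.map_map]
    simp [Function.comp_def]
  have hnodup : cap0.keys.Nodup := by rw [hkeys]; exact PySem.Set.nodup_ofList _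
  have hget0 : ∀ lab, lab ∈ labels → cap0.getD lab 0 = pvCapv labels max_inst lab := by
    intro lab hmem
    exact PySem.Dict.getD_of_mem_items cap0
      (by rw [hitems]; exact List.mem_map.mpr ⟨lab, (PySem.Set.mem_ofList _ _).mpr hmem, rfl⟩)
      hnodup 0
  have hcont : cap0.contains "other" = true ↔ "other" ∈ labels := by
    rw [PySem.Dict.contains_iff_mem_keys, hkeys, PySem.Set.mem_ofList]
  have hsum : ((cap0.items.filter (fun q => ¬ (q.1 = "other"))).map (·.2)).sum
      = pvSigma labels max_inst := by
    rw [hitems, List.filter_map, List.map_map]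
    unfold pvSigma
    congr 1
  constructor
  · intro lab hmem hns
    rw [hcapF]
    split
    · rename_i hif
      have hao : also_other = false := hif.1
      have hne : lab ≠ "other" := fun he => hns ⟨he, hao⟩
      rw [PySem.Dict.getD_insert_of_ne _ _ _ hne]
      exact hget0 lab hmem
    · exact hget0 lab hmem
  · intro hao hmem
    rw [hcapF]
    rw [if_pos ⟨hao, hcont.mpr hmem⟩, PySem.Dict.getD_insert_self, hsum]

theorem pvNumDsi (pairs : List (String × String)) (max_inst : Int) :
    ((((pvCFilter (pvKA max_inst false) pairs (fun _ => 0)).map (·.2)).filter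
        (fun x => ¬ (x = "other"))).length : Int)
      = pvSigma (pairs.map (·.2)) max_inst := by
  set labels := pairs.map (·.2) with hlabels
  set L := ((pvCFilter (pvKA max_inst false) pairs (fun _ => 0)).map (·.2)).filter
      (fun x => ¬ (x = "other")) with hL
  set S' := (PySem.Set.ofList labels).filter (fun k => ¬ (k = "other")) with hS'
  have hS'nodup : S'.Nodup := (PySem.Set.nodup_ofList _).filter _
  have hsub : ∀ x, x ∈ L → x ∈ S' := by
    intro x hx
    rw [hL, List.mem_filter] at hx
    obtain ⟨hx1, hx2⟩ := hx
    rw [hS', List.mem_filter]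
    refine ⟨(PySem.Set.mem_ofList _ _).mpr ?_, hx2⟩
    rw [hlabels]
    exact (List.map_subset _ ((pvCFilter_sublist _ pairs (fun _ => 0)).subset)) hx1
  have hptw : ∀ x, x ∈ S' → pvCapv labels max_inst x = (L.count x : Int) := by
    intro x hxS
    rw [hS', List.mem_filter] at hxS
    obtain ⟨hx1, hx2⟩ := hxS
    have hxo : ¬ (x = "other") := by simpa using hx2
    have hcnt1 : L.count x = ((pvCFilter (pvKA max_inst false) pairs (fun _ => 0)).map (·.2)).count x := by
      rw [hL]
      exact List.count_filter (by simpa using hxo)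
    have hcnt2 := pvCFilter_count (pvKA max_inst false) x max_inst
      (fun c => by unfold pvKA; simp [hxo]) pairs (fun _ => 0)
    rw [hcnt1, hcnt2]
    unfold pvCapv
    have : (0:Int) ≤ (labels.count x : Int) := by positivity
    rw [hlabels]
    split_ifs <;> omega
  have hfin : ∀ x ∈ S'.toFinset, x ∉ L.toFinset → (L.count x : Int) = 0 := by
    intro x _ hx
    rw [List.mem_toFinset] at hx
    simp [List.count_eq_zero.mpr hx]
  have hlen : ∑ x ∈ L.toFinset, (L.count x : Int) = (L.length : Int) := by
    have h2 : ∑ a ∈ L.toFinset, L.count a = L.length := by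
      simpa using Multiset.toFinset_sum_count_eq (L : Multiset String)
    rw [← h2]
    push_cast
    rfl
  have hsubfin : L.toFinset ⊆ S'.toFinset := by
    intro x hx
    rw [List.mem_toFinset] at hx ⊢
    exact hsub x hx
  unfold pvSigma
  rw [← List.sum_toFinset _ hS'nodup]
  rw [Finset.sum_congr rfl (fun x hx => hptw x (List.mem_toFinset.mp hx))]
  rw [← Finset.sum_subset hsubfin hfin, hlen]

theorem pvMain (X_orig Y_orig : List String) (max_inst : Int) (also_other : Bool) :
    down_sample_data X_orig Y_orig max_inst also_other
      = down_sample_data_alt X_orig Y_orig max_inst also_other := by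
  rw [pvAShape, pvBShape]
  obtain ⟨hcap1, hcap2⟩ := pvCapF_getD ((X_orig.zip Y_orig).map (·.2)) max_inst also_other
    _ (down_sample_cap_table (X_orig.zip Y_orig) max_inst also_other)
    (pvCap0_items (X_orig.zip Y_orig) max_inst)
    (by unfold down_sample_cap_table; rfl)
  have hmem : ∀ (lab : String) (c : Int), 0 ≤ c →
      c < (0:Int) + ((((X_orig.zip Y_orig).map (·.2)).count lab : Int)) →
      lab ∈ (X_orig.zip Y_orig).map (·.2) := by
    intro lab c h0 hc
    have : 0 < ((X_orig.zip Y_orig).map (·.2)).count lab := by omega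
    exact List.count_pos_iff.mp this
  cases also_other with
  | true =>
    have hcf : pvCFilter (pvKA max_inst true) (X_orig.zip Y_orig) (fun _ => 0)
        = pvCFilter (pvKB (fun lab =>
            (down_sample_cap_table (X_orig.zip Y_orig) max_inst true).getD lab 0))
          (X_orig.zip Y_orig) (fun _ => 0) := by
      apply pvCFilter_congr
      intro lab c h0 hc
      have hlabmem := hmem lab c h0 hc
      have hcapv := hcap1 lab hlabmem (by simp)
      have h1 : pvKA max_inst true lab c = decide (c < max_inst) := by
        unfold pvKA; simp
      rw [h1]
      simp only [pvKB]
      simp only [hcapv]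
      apply decide_eq_decide.mpr
      unfold pvCapv
      split_ifs <;> omega
    rw [hcf]
    simp
  | false =>
    simp only [Bool.false_eq_true, if_false]
    rw [pvOtherShape]
    rw [pvCFilter_comp (pvKA max_inst false)
      (pvK2 (((((pvCFilter (pvKA max_inst false) (X_orig.zip Y_orig) (fun _ => 0)).map (·.2)).filter (fun x => ¬ (x = "other"))).length : Int)))
      (fun c => by unfold pvKA; simp)
      (fun lab c hlab => by unfold pvK2; simp [hlab])
      (X_orig.zip Y_orig) (fun _ => 0) (fun _ => 0) rfl]
    have hcf : pvCFilter (fun lab c => pvKA max_inst false lab c &&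
          pvK2 (((((pvCFilter (pvKA max_inst false) (X_orig.zip Y_orig) (fun _ => 0)).map (·.2)).filter (fun x => ¬ (x = "other"))).length : Int)) lab c)
          (X_orig.zip Y_orig) (fun _ => 0)
        = pvCFilter (pvKB (fun lab =>
            (down_sample_cap_table (X_orig.zip Y_orig) max_inst false).getD lab 0))
          (X_orig.zip Y_orig) (fun _ => 0) := by
      apply pvCFilter_congr
      intro lab c h0 hc
      have hlabmem := hmem lab c h0 hc
      by_cases ho : lab = "other"
      · subst ho
        have h1 : pvKA max_inst false "other" c = true := by unfold pvKA; simp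
        have h2 : pvK2 (((((pvCFilter (pvKA max_inst false) (X_orig.zip Y_orig) (fun _ => 0)).map (·.2)).filter (fun x => ¬ (x = "other"))).length : Int)) "other" c
            = decide (c < pvSigma ((X_orig.zip Y_orig).map (·.2)) max_inst) := by
          unfold pvK2
          rw [pvNumDsi]
          simp
        rw [h1, Bool.true_and, h2]
        simp only [pvKB]
        simp only [hcap2 rfl hlabmem]
      · have h2 : pvK2 (((((pvCFilter (pvKA max_inst false) (X_orig.zip Y_orig) (fun _ => 0)).map (·.2)).filter (fun x => ¬ (x = "other"))).length : Int)) lab c = true := by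
          unfold pvK2; simp [ho]
        have h1 : pvKA max_inst false lab c = decide (c < max_inst) := by
          unfold pvKA; simp [ho]
        rw [h1, h2, Bool.and_true]
        simp only [pvKB]
        simp only [hcap1 lab hlabmem (fun h => ho h.1)]
        apply decide_eq_decide.mpr
        unfold pvCapv
        split_ifs <;> omega
    rw [hcf]

-- ===== VERDICT (by name: the statement is the Claim_ definition above) =====
theorem down_sample_data_spec : Claim_equal_down_sample_data := by
  intro X_orig Y_orig max_inst also_other _
  unfold Spec_down_sample_data
  exact pvMain X_orig Y_orig max_inst also_other
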